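-- pv_equiv track=rewrite | github.com/kimdy003/Python_study | 3_Programmers/level_3/셔틀버스.py | solution
-- ===== SOURCE A (Python) =====
-- def intToStr(time):
--     h, m = time // 60, time % 60
--     h = "0" + str(h) if h < 10 else str(h)
--     m = "0" + str(m) if m < 10 else str(m)
--     return h + ":" + m
--
-- def solution(n, t, m, timetable):
--     timetable = [int(i[:2]) * 60 + int(i[3:]) for i in timetable]
--     timetable.sort()
--     bustable = [9 * 60 + t * i for i in range(n)]
--
--     for bus in bustable:
--         passenger = [p for p in timetable if p <= bus]
--
--         if bus == bustable[-1]: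
--             if m <= len(passenger):
--                 answer = passenger[m - 1] - 1
--             elif len(passenger) < m:
--                 answer = bus
--
--         elif len(passenger) < m:
--             timetable = timetable[len(passenger) :]
--
--         elif m <= len(passenger):
--             timetable = timetable[m:]
--
--     return intToStr(answer)
-- ===== SOURCE B (Python) =====
-- def intToStr(time):
--     h, m = time // 60, time % 60
--     h = "0" + str(h) if h < 10 else str(h)
--     m = "0" + str(m) if m < 10 else str(m)
--     return h + ":" + m
--
-- def solution(n, t, m, timetable):
--     times = sorted(int(s[:2]) * 60 + int(s[3:]) for s in timetable)
--     last = 9 * 60 + t * (n - 1)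
--     idx = 0
--     answer = 0
--     for i in range(n):
--         bus = 9 * 60 + t * i
--         if bus == last:
--             cnt = sum(1 for p in times[idx:] if p <= bus)
--             if cnt >= m:
--                 answer = times[idx + m - 1] - 1
--             else:
--                 answer = bus
--         else:
--             boarded = 0
--             while boarded < m and idx < len(times) and times[idx] <= bus:
--                 idx += 1
--                 boarded += 1
--     return intToStr(answer)
-- ===== Notes on version B (the rewrite author's own statement) =====
-- stated objective: faster
-- what changed: A rebuilds a boardable-passenger list and re-slices the whole timetable for every bus (O(n*k) list work); B sorts once and runs a single cursor over the sorted times, advancing it by at most m per bus, with one count at the last departure.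
-- outside the precondition, e.g. on solution(1, 1, 0, ['08:00', '10:00']): A returns '07:59', B returns '09:59'
import Mathlib
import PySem

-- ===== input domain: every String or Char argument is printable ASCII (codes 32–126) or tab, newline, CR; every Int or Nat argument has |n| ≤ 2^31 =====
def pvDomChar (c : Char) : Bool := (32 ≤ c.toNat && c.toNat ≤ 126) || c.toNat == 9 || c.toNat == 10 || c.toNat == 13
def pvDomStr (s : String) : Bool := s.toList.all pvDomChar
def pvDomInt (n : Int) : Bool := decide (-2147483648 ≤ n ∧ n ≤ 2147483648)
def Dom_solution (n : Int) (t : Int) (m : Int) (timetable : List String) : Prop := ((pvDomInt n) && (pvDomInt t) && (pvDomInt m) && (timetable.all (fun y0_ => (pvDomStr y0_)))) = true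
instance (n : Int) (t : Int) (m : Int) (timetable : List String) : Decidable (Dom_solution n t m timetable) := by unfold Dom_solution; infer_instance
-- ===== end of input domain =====

-- B replaces A's per-bus passenger-list rebuild and whole-timetable re-slicing by one cursor pass
-- over the sorted times (objective: faster).


-- ===== PORT A =====
-- shared helpers: the Python `intToStr` (textually identical in Source A and Source B) and the conversion
-- `int(i[:2]) * 60 + int(i[3:])` (the `.getD 0` is unreachable: Pre_solution requires both int() calls to succeed)
def intToStr (time : Int) : String :=
  let h := PySem.Int.floordiv time 60
  let mm := PySem.Int.mod time 60
  let hs := if h < 10 then "0" ++ PySem.Int.toStr h else PySem.Int.toStr h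
  let ms := if mm < 10 then "0" ++ PySem.Int.toStr mm else PySem.Int.toStr mm
  hs ++ ":" ++ ms

def parseTime (s : String) : Int :=
  (PySem.Int.ofStr? (PySem.Str.slice s (some 0) (some 2))).getD 0 * 60 +
  (PySem.Int.ofStr? (PySem.Str.slice s (some 3) none)).getD 0

-- the body of A's `for bus in bustable` loop; state = (timetable, answer)
def solutionStep (bustable : List Int) (m : Int) (st : List Int × Int) (bus : Int) : List Int × Int :=
  let tt := st.1
  let ans := st.2
  let passenger := tt.filter (fun p => decide (p ≤ bus))
  if bus = (PySem.List.pyGet? bustable (-1)).getD 0 then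
    if m ≤ (passenger.length : Int) then
      (tt, (PySem.List.pyGet? passenger (m - 1)).getD 0 - 1)
    else if (passenger.length : Int) < m then (tt, bus)
    else (tt, ans)
  else if (passenger.length : Int) < m then
    (PySem.List.slice tt (some (passenger.length : Int)) none, ans)
  else if m ≤ (passenger.length : Int) then
    (PySem.List.slice tt (some m) none, ans)
  else (tt, ans)

def solution (n : Int) (t : Int) (m : Int) (timetable : List String) : String :=
  let tt := PySem.List.sorted (timetable.map parseTime) (fun x => x) false
  let bustable := (PySem.List.pyRange 0 n 1).map (fun i => 9 * 60 + t * i)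
  let res := bustable.foldl (solutionStep bustable m) (tt, 0)
  intToStr res.2

-- ===== PORT B =====
-- Source B's `while boarded < m and idx < len(times) and times[idx] <= bus` cursor advance
-- (the `idx < len(times)` test is checked first here so that the access is well-formed; when any
-- test fails, both orders stop with the same idx)
def boardLoop (times : List Int) (m bus : Int) (idx boarded : Nat) : Nat :=
  if h : idx < times.length then
    if (boarded : Int) < m ∧ times[idx] ≤ bus then
      boardLoop times m bus (idx + 1) (boarded + 1)
    else idx
  else idx
termination_by times.length - idx

-- the body of Source B's `for i in range(n)` loop; state = (idx, answer); the `times[idx+m-1]` access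
-- is in range whenever its branch is taken (cnt ≥ m), so the `.getD 0` is unreachable
def altStep (times : List Int) (t lastBus m : Int) (st : Nat × Int) (i : Int) : Nat × Int :=
  let bus := 9 * 60 + t * i
  if bus = lastBus then
    let cnt := ((PySem.List.slice times (some (st.1 : Int)) none).filter (fun p => decide (p ≤ bus))).length
    if m ≤ (cnt : Int) then (st.1, (PySem.List.pyGet? times ((st.1 : Int) + m - 1)).getD 0 - 1)
    else (st.1, bus)
  else (boardLoop times m bus st.1 0, st.2)

def solution_alt (n : Int) (t : Int) (m : Int) (timetable : List String) : String :=
  let times := PySem.List.sorted (timetable.map parseTime) (fun x => x) false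
  let lastBus := 9 * 60 + t * (n - 1)
  let res := (PySem.List.pyRange 0 n 1).foldl (altStep times t lastBus m) (0, 0)
  intToStr res.2

-- ===== PRECONDITION & SPEC =====
-- Pre_ restricts to the shuttle problem's natural domain: at least one bus (for n ≤ 0 the loop never
-- runs and A hits NameError on `answer`), a positive capacity (for m ≤ 0 both programs index
-- `[m-1]` through Python's negative-index wraparound — an accident neither value specifies, and a
-- possible IndexError), and each timetable entry parseable as HH:MM (else A raises ValueError).
def Pre_solution (n : Int) (t : Int) (m : Int) (timetable : List String) : Prop :=
  1 ≤ n ∧ 1 ≤ m ∧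
  ∀ s ∈ timetable,
    (PySem.Int.ofStr? (PySem.Str.slice s (some 0) (some 2))).isSome = true ∧
    (PySem.Int.ofStr? (PySem.Str.slice s (some 3) none)).isSome = true
instance (n : Int) (t : Int) (m : Int) (timetable : List String) : Decidable (Pre_solution n t m timetable) := by unfold Pre_solution; infer_instance

def pvWitness_solution : Int × Int × Int × List String := (2, 10, 1, ["09:00", "09:05"])

def Spec_solution (n : Int) (t : Int) (m : Int) (timetable : List String) (out : String) : Prop := out = solution_alt n t m timetable
instance (n : Int) (t : Int) (m : Int) (timetable : List String) (out : String) : Decidable (Spec_solution n t m timetable out) := by unfold Spec_solution; infer_instance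

-- ===== CLAIM (what is proved, stated in full; the proofs are below) =====
def Claim_equal_solution : Prop := ∀ (n : Int) (t : Int) (m : Int) (timetable : List String), Dom_solution n t m timetable → Pre_solution n t m timetable → Spec_solution n t m timetable (solution n t m timetable)

-- ===== LEMMAS AND PROOFS =====

-- on a ≤-sorted list, filtering by (≤ bus) is taking the initial run
theorem filter_eq_takeWhile_of_sorted (bus : Int) :
    ∀ (l : List Int), l.Pairwise (· ≤ ·) →
      l.filter (fun p => decide (p ≤ bus)) = l.takeWhile (fun p => decide (p ≤ bus)) := by
  intro l hl
  induction l with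
  | nil => rfl
  | cons x xs ih =>
    rcases List.pairwise_cons.mp hl with ⟨hx, hxs⟩
    by_cases hxb : x ≤ bus
    · simp [hxb, ih hxs]
    · have hnil : (x :: xs).filter (fun p => decide (p ≤ bus)) = [] := by
        apply List.filter_eq_nil_iff.mpr
        intro y hy
        simp only [decide_eq_true_eq]
        intro hyb
        rcases List.mem_cons.mp hy with h | h
        · exact hxb (h ▸ hyb)
        · exact hxb (le_trans (hx y h) hyb)
      rw [hnil, List.takeWhile_cons]
      simp [hxb]

-- the cursor advance equals idx + min(remaining budget, length of the ≤-run after idx)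
theorem boardLoop_eq (L : List Int) (m bus : Int) :
    ∀ (fuel idx boarded : Nat), L.length - idx ≤ fuel →
      boardLoop L m bus idx boarded =
        idx + min (m - boarded).toNat ((L.drop idx).takeWhile (fun p => decide (p ≤ bus))).length := by
  intro fuel
  induction fuel with
  | zero =>
    intro idx boarded hfuel
    have hlen : L.length ≤ idx := by omega
    rw [boardLoop, dif_neg (by omega)]
    simp [List.drop_eq_nil_of_le hlen]
  | succ f ih =>
    intro idx boarded hfuel
    rw [boardLoop]
    by_cases hidx : idx < L.length
    · rw [dif_pos hidx]
      have hdrop : L.drop idx = L[idx] :: L.drop (idx + 1) := List.drop_eq_getElem_cons hidx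
      by_cases hcond : (boarded : Int) < m ∧ L[idx] ≤ bus
      · rw [if_pos hcond]
        rw [ih (idx + 1) (boarded + 1) (by omega)]
        rw [hdrop, List.takeWhile_cons]
        simp only [hcond.2, decide_true, if_true, List.length_cons]
        have h1 : (m - (boarded : Int)).toNat = (m - ((boarded : Nat) + 1 : Nat)).toNat + 1 := by
          push_cast; omega
        omega
      · rw [if_neg hcond]
        by_cases hbm : (boarded : Int) < m
        · have hgt : ¬ L[idx] ≤ bus := fun h => hcond ⟨hbm, h⟩
          rw [hdrop, List.takeWhile_cons]
          simp [hgt]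
        · have : (m - (boarded : Int)).toNat = 0 := by omega
          simp [this]
    · rw [dif_neg hidx]
      rw [List.drop_eq_nil_of_le (by omega)]
      simp

-- A's loop body at a non-last bus trims the timetable exactly as the cursor advances
theorem step_front (bustable L : List Int) (hL : L.Pairwise (· ≤ ·)) (m : Int) (hm : 1 ≤ m)
    (bus : Int) (hbus : bus ≠ (PySem.List.pyGet? bustable (-1)).getD 0) (idx : Nat) (a : Int) :
    solutionStep bustable m (L.drop idx, a) bus = (L.drop (boardLoop L m bus idx 0), a) := by
  have hLd : (L.drop idx).Pairwise (· ≤ ·) := List.Pairwise.sublist (List.drop_sublist idx L) hL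
  have hfil := filter_eq_takeWhile_of_sorted bus (L.drop idx) hLd
  have hbl := boardLoop_eq L m bus (L.length - idx) idx 0 (by omega)
  set c := ((L.drop idx).takeWhile (fun p => decide (p ≤ bus))).length with hc
  unfold solutionStep
  dsimp only
  rw [if_neg hbus]
  simp only [hfil, ← hc]
  by_cases hcm : (c : Int) < m
  · rw [if_pos hcm, PySem.List.slice_from_natCast, List.drop_drop, hbl]
    have : min (m - (0:Nat)).toNat c = c := by omega
    rw [this, Nat.add_comm]
  · rw [if_neg hcm, if_pos (by omega), PySem.List.slice_from (L.drop idx) (a := m) (by omega), List.drop_drop, hbl]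
    have : min (m - (0:Nat)).toNat c = m.toNat := by omega
    rw [this, Nat.add_comm]

-- A's loop body at the last bus keeps the timetable and computes B's last-bus answer
theorem step_last (bustable L : List Int) (hL : L.Pairwise (· ≤ ·)) (m : Int) (hm : 1 ≤ m)
    (g : Int) (hg : (PySem.List.pyGet? bustable (-1)).getD 0 = g) (idx : Nat) (a : Int) :
    solutionStep bustable m (L.drop idx, a) g
      = (L.drop idx,
         if m ≤ ((((L.drop idx).filter (fun p => decide (p ≤ g))).length : Nat) : Int) then
           (PySem.List.pyGet? L ((idx : Int) + m - 1)).getD 0 - 1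
         else g) := by
  have hLd : (L.drop idx).Pairwise (· ≤ ·) := List.Pairwise.sublist (List.drop_sublist idx L) hL
  have hfil := filter_eq_takeWhile_of_sorted g (L.drop idx) hLd
  unfold solutionStep
  dsimp only
  rw [hg, if_pos rfl]
  by_cases hcm : m ≤ (((L.drop idx).filter (fun p => decide (p ≤ g))).length : Int)
  · rw [if_pos hcm, if_pos hcm]
    set p := (L.drop idx).filter (fun p => decide (p ≤ g)) with hp
    have hlt : (m - 1).toNat < p.length := by omega
    have hpre : p <+: L.drop idx := hfil ▸ List.takeWhile_prefix _
    obtain ⟨suf, hsuf⟩ := hpre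
    have h1 : PySem.List.pyGet? p (m - 1) = p[(m - 1).toNat]? :=
      PySem.List.pyGet?_of_nonneg p (by omega)
    have h2 : p[(m - 1).toNat]? = (L.drop idx)[(m - 1).toNat]? := by
      rw [← hsuf, List.getElem?_append_left hlt]
    have h3 : (L.drop idx)[(m - 1).toNat]? = L[idx + (m - 1).toNat]? := List.getElem?_drop ..
    have h4 : PySem.List.pyGet? L ((idx : Int) + m - 1)
        = L[(idx + (m - 1).toNat : Nat)]? := by
      have : (idx : Int) + m - 1 = (((idx + (m - 1).toNat : Nat) : Nat) : Int) := by push_cast; omega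
      rw [this, PySem.List.pyGet?_natCast]
    rw [h1, h2, h3, h4]
  · have hlt : ((((L.drop idx).filter (fun p => decide (p ≤ g))).length : Nat) : Int) < m := by omega
    rw [if_neg hcm, if_pos hlt, if_neg hcm]

-- simulation: A's fold over the mapped buses tracks B's fold over the raw indices, A's remaining
-- timetable being L dropped at B's cursor (this covers the t = 0 case, where every bus equals the
-- last departure and both programs take their last-bus branch on every iteration)
theorem fold_sim (bustable L : List Int) (hL : L.Pairwise (· ≤ ·)) (m : Int) (hm : 1 ≤ m)
    (t last : Int) (hguard : (PySem.List.pyGet? bustable (-1)).getD 0 = last) :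
    ∀ (is : List Int) (idx : Nat) (a : Int),
      (is.map (fun i => 9 * 60 + t * i)).foldl (solutionStep bustable m) (L.drop idx, a)
        = (L.drop (is.foldl (altStep L t last m) (idx, a)).1,
           (is.foldl (altStep L t last m) (idx, a)).2) := by
  intro is
  induction is with
  | nil => intro idx a; rfl
  | cons i rest ih =>
    intro idx a
    rw [List.map_cons, List.foldl_cons, List.foldl_cons]
    by_cases h : 9 * 60 + t * i = last
    · have hg : (PySem.List.pyGet? bustable (-1)).getD 0 = 9 * 60 + t * i := hguard.trans h.symm
      rw [step_last bustable L hL m hm _ hg idx a]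
      have hB : altStep L t last m (idx, a) i
          = (idx,
             if m ≤ ((((L.drop idx).filter (fun p => decide (p ≤ 9 * 60 + t * i))).length : Nat) : Int) then
               (PySem.List.pyGet? L ((idx : Int) + m - 1)).getD 0 - 1
             else 9 * 60 + t * i) := by
        unfold altStep
        dsimp only
        rw [if_pos h, PySem.List.slice_from_natCast]
        by_cases hcm : m ≤ ((((L.drop idx).filter (fun p => decide (p ≤ 9 * 60 + t * i))).length : Nat) : Int)
        · rw [if_pos hcm, if_pos hcm]
        · rw [if_neg hcm, if_neg hcm]
      rw [hB, ih]
    · rw [step_front bustable L hL m hm _ (fun hc => h (hc.trans hguard)) idx a]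
      have hB : altStep L t last m (idx, a) i = (boardLoop L m (9 * 60 + t * i) idx 0, a) := by
        unfold altStep; dsimp only; rw [if_neg h]
      rw [hB, ih]

-- ===== VERDICT (by name: the statement is the Claim_ definition above) =====
theorem solution_spec : Claim_equal_solution := by
  intro n t m timetable _hdom hpre
  obtain ⟨hn, hm, _⟩ := hpre
  unfold Spec_solution solution solution_alt
  dsimp only
  set L := PySem.List.sorted (timetable.map parseTime) (fun x => x) false with hLdef
  have hL : L.Pairwise (· ≤ ·) := by
    have := PySem.List.sorted_pairwise (timetable.map parseTime) (fun x => x)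
    simpa using this
  set f : Int → Int := fun i => 9 * 60 + t * i with hf
  have hsplit : PySem.List.pyRange 0 n 1 = PySem.List.pyRange 0 (n - 1) 1 ++ [n - 1] := by
    have h := PySem.List.pyRange_one_succ_right (a := 0) (b := n - 1) (by omega)
    rwa [show n - 1 + 1 = n by ring] at h
  set bustable := (PySem.List.pyRange 0 n 1).map f with hbt
  have hguard : (PySem.List.pyGet? bustable (-1)).getD 0 = 9 * 60 + t * (n - 1) := by
    rw [hbt, hsplit, List.map_append, List.map_cons, List.map_nil,
      PySem.List.pyGet?_neg_one_append_singleton]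
    rfl
  have hsim := fold_sim bustable L hL m hm t (9 * 60 + t * (n - 1)) hguard
    (PySem.List.pyRange 0 n 1) 0 0
  rw [List.drop_zero] at hsim
  rw [← hbt] at hsim
  rw [hsim]
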